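-- pv_equiv track=rewrite | github.com/athn-nik/teach | render.py | extend_paths
-- ===== SOURCE A (Python) =====
-- good_ones = ["00073", "00821", "01284", "03083", "00848"]
--
-- def extend_paths(path):
--     if "INDEX" in path:
--         paths = [path.replace("INDEX", str(i)) for i in range(10)]
--     else:
--         paths = [path]
--
--     if "NAME" in path:
--         all_paths = []
--         for path in paths:
--             all_paths.extend([path.replace("NAME", x) for x in good_ones])
--         paths = all_paths
--
--     return paths
-- ===== SOURCE B (Python) =====
-- good_ones = ["00073", "00821", "01284", "03083", "00848"]
--
-- def extend_paths(path):
--     # depth-first recursion: each output string is built completely (all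
--     # placeholders substituted) before the next one is started; no intermediate
--     # list of partially-expanded paths is ever materialised.
--     def expand(p, tokens):
--         if not tokens:
--             return [p]
--         tok, repls = tokens[0]
--         rest = tokens[1:]
--         if tok not in path:  # presence is tested on the original path, as A does
--             return expand(p, rest)
--         return [q for r in repls for q in expand(p.replace(tok, r), rest)]
--     return expand(path, [("INDEX", [str(i) for i in range(10)]), ("NAME", good_ones)])
-- ===== Notes on version B (the rewrite author's own statement) =====
-- stated objective: alternative
-- what changed: Replaces A's staged breadth-first passes (build the whole INDEX-expanded list, then rescan it for NAME) with a depth-first recursion over a token list that fully substitutes one output string at a time and never materialises a partially-expanded list.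
import Mathlib
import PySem

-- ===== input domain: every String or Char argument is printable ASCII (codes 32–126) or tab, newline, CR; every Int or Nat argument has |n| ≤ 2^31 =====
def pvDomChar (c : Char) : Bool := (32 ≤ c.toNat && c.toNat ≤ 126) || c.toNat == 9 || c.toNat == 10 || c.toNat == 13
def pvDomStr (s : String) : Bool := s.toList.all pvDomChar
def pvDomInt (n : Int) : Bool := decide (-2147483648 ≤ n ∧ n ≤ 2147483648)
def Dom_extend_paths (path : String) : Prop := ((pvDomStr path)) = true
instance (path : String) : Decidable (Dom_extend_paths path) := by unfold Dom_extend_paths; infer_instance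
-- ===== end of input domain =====

-- B replaces A's staged breadth-first list passes with a depth-first recursion
-- over a token list that builds each fully-substituted output string in turn.

-- ===== PORT A =====
def good_ones : List String := ["00073", "00821", "01284", "03083", "00848"]

def extend_paths (path : String) : List String :=
  let paths :=
    if PySem.Str.isIn "INDEX" path then
      (PySem.List.pyRange 0 10 1).map (fun i => PySem.Str.replace path "INDEX" (PySem.Int.toStr i))
    else [path]
  if PySem.Str.isIn "NAME" path then
    paths.foldl (fun all_paths p =>
      all_paths ++ good_ones.map (fun x => PySem.Str.replace p "NAME" x)) []
  else paths

-- ===== PORT B =====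
def pvExpand (orig : String) (p : String) : List (String × List String) → List String
  | [] => [p]
  | (tok, repls) :: rest =>
      if PySem.Str.isIn tok orig then
        repls.flatMap (fun r => pvExpand orig (PySem.Str.replace p tok r) rest)
      else pvExpand orig p rest

def extend_paths_alt (path : String) : List String :=
  pvExpand path path
    [("INDEX", (PySem.List.pyRange 0 10 1).map PySem.Int.toStr), ("NAME", good_ones)]

-- ===== PRECONDITION & SPEC =====
def Spec_extend_paths (path : String) (out : List String) : Prop := out = extend_paths_alt path
instance (path : String) (out : List String) : Decidable (Spec_extend_paths path out) := by unfold Spec_extend_paths; infer_instance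

-- ===== CLAIM (what is proved, stated in full; the proofs are below) =====
def Claim_equal_extend_paths : Prop := ∀ (path : String), Dom_extend_paths path → Spec_extend_paths path (extend_paths path)

-- ===== LEMMAS AND PROOFS =====
theorem pv_flatten_map_singleton {α β : Type} (l : List α) (f : α → β) :
    (l.map (fun x => [f x])).flatten = l.map f := by
  induction l with
  | nil => rfl
  | cons h t ih => simp [ih]

-- ===== VERDICT (by name: the statement is the Claim_ definition above) =====
theorem extend_paths_spec : Claim_equal_extend_paths := by
  intro path _
  unfold Spec_extend_paths extend_paths extend_paths_alt
  simp only [pvExpand, PySem.Str.isIn]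
  by_cases hI : PySem.Chars.isIn ['I','N','D','E','X'] path.toList = true <;>
    by_cases hN : PySem.Chars.isIn ['N','A','M','E'] path.toList = true <;>
      simp [hI, hN, good_ones, List.flatMap, List.map_map,
        pv_flatten_map_singleton, Function.comp_def]
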